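-- pv_equiv track=rewrite | github.com/brensinc/SCAnS | EV_charging/StSTL/find_comma.py | find_comma
-- ===== SOURCE A (Python) =====
-- def find_comma(input_str):
--     """
--     Find locations of commas that separate parameters in the input string.
--
--     Returns:
--         comma_index: list of positions of valid commas
--         comma_num: number of such commas
--     """
--     n = len(input_str)
--     comma_index = []
--     comma_num = 0
--
--     # Get the positions of all left and right parentheses
--     left_par = [i for i, c in enumerate(input_str) if c == '(']
--     right_par = [i for i, c in enumerate(input_str) if c == ')']
--
--     for i, char in enumerate(input_str):
--         if char == ',':
--             # Count how many left/right parentheses are up to this index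
--             num_left = sum(pos <= i for pos in left_par)
--             num_right = sum(pos <= i for pos in right_par)
--             if num_left == num_right:
--                 comma_index.append(i)
--                 comma_num += 1
--
--     return comma_index, comma_num
-- ===== SOURCE B (Python) =====
-- def find_comma(input_str):
--     """Single pass: track running parenthesis depth; record commas at depth zero."""
--     comma_index = []
--     depth = 0
--     for i, c in enumerate(input_str):
--         if c == '(':
--             depth += 1
--         elif c == ')':
--             depth -= 1
--         elif c == ',' and depth == 0:
--             comma_index.append(i)
--     return comma_index, len(comma_index)
-- ===== Notes on version B (the rewrite author's own statement) =====
-- stated objective: faster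
-- what changed: Replaces the per-comma rescans of the parenthesis position lists with a single left-to-right pass maintaining a running depth counter.
import Mathlib
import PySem

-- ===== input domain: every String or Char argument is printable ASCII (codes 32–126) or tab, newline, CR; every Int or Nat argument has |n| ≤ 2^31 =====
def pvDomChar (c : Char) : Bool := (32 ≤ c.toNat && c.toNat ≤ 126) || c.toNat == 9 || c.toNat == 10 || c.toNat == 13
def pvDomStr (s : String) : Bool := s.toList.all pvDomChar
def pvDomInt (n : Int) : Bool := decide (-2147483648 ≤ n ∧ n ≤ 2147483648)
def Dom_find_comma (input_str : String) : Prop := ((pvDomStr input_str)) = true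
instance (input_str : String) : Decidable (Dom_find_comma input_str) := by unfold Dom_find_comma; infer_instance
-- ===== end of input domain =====

-- B replaces A's per-comma rescans of the parenthesis position lists with one
-- pass maintaining a running depth counter (objective: faster, O(n) vs O(n^2)).

-- ===== PORT A =====
-- left_par / right_par comprehensions
def pvParPositions (cs : List Char) (ch : Char) : List Int :=
  (PySem.List.enumerate cs).filterMap (fun ic => if ic.2 = ch then some ic.1 else none)

-- sum(pos <= i for pos in par)  (Python bools sum as ints)
def pvCountLe (par : List Int) (i : Int) : Int :=
  (par.map (fun pos => if pos ≤ i then (1 : Int) else 0)).sum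

def pvStepA (left_par right_par : List Int) (st : List Int × Int) (ic : Int × Char) :
    List Int × Int :=
  if ic.2 = ',' then
    if pvCountLe left_par ic.1 = pvCountLe right_par ic.1 then (st.1 ++ [ic.1], st.2 + 1)
    else st
  else st

def find_comma (input_str : String) : List Int × Int :=
  let cs := input_str.toList
  let left_par := pvParPositions cs '('
  let right_par := pvParPositions cs ')'
  (PySem.List.enumerate cs).foldl (pvStepA left_par right_par) ([], 0)

-- ===== PORT B =====
-- state = (comma_index, depth)
def pvStepB (st : List Int × Int) (ic : Int × Char) : List Int × Int :=
  if ic.2 = '(' then (st.1, st.2 + 1)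
  else if ic.2 = ')' then (st.1, st.2 - 1)
  else if ic.2 = ',' ∧ st.2 = 0 then (st.1 ++ [ic.1], st.2)
  else st

def find_comma_alt (input_str : String) : List Int × Int :=
  let st := (PySem.List.enumerate input_str.toList).foldl pvStepB ([], 0)
  (st.1, (st.1.length : Int))

-- ===== PRECONDITION & SPEC =====
def Spec_find_comma (input_str : String) (out : List Int × Int) : Prop := out = find_comma_alt input_str
instance (input_str : String) (out : List Int × Int) : Decidable (Spec_find_comma input_str out) := by unfold Spec_find_comma; infer_instance

-- ===== CLAIM (what is proved, stated in full; the proofs are below) =====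
def Claim_equal_find_comma : Prop := ∀ (input_str : String), Dom_find_comma input_str → Spec_find_comma input_str (find_comma input_str)

-- ===== LEMMAS AND PROOFS =====

-- A's inner sum over the positions of `ch` counts occurrences of `ch` in the prefix.
lemma pvCountLe_enum (ch : Char) (cs : List Char) :
    ∀ (s k : Int),
      pvCountLe ((PySem.List.enumerate cs s).filterMap
        (fun ic => if ic.2 = ch then some ic.1 else none)) k
      = ((cs.take (k + 1 - s).toNat).count ch : Int) := by
  induction cs with
  | nil => intro s k; simp [pvCountLe, PySem.List.enumerate_nil]
  | cons c cs ih =>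
      intro s k
      have ih' := ih (s + 1) k
      unfold pvCountLe at ih' ⊢
      rw [PySem.List.enumerate_cons]
      by_cases hk : s ≤ k
      · have ht : (k + 1 - s).toNat = (k + 1 - (s + 1)).toNat + 1 := by omega
        by_cases hc : c = ch
        · simp [hc, hk, ih', ht]
          ring
        · simp [hc, ih', ht]
      · have ht : (k + 1 - s).toNat = 0 := by omega
        have ht' : (k + 1 - (s + 1)).toNat = 0 := by omega
        rw [ht'] at ih'
        by_cases hc : c = ch
        · simp [hc, hk, ih', ht]
        · simp [hc, ih', ht]

-- Main loop invariant: after the prefix l, A's fold (with counter = length of the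
-- accumulated comma list) and B's fold (with depth = #'(' - #')' in l) produce the
-- same comma list, and A's counter is the length of B's list.
lemma pv_main (cs : List Char) :
    ∀ (r l : List Char) (acc : List Int), cs = l ++ r →
      (PySem.List.enumerate r (l.length : Int)).foldl
          (pvStepA (pvParPositions cs '(') (pvParPositions cs ')')) (acc, (acc.length : Int))
      = (((PySem.List.enumerate r (l.length : Int)).foldl pvStepB
            (acc, ((l.count '(' : Int) - (l.count ')' : Int)))).1,
         (((PySem.List.enumerate r (l.length : Int)).foldl pvStepB
            (acc, ((l.count '(' : Int) - (l.count ')' : Int)))).1.length : Int)) := by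
  intro r
  induction r with
  | nil => intro l acc h; simp [PySem.List.enumerate_nil]
  | cons c r ih =>
      intro l acc h
      have hcs : cs = (l ++ [c]) ++ r := by simp [h]
      have hstart : (l.length : Int) + 1 = (((l ++ [c]).length : Int)) := by simp
      rw [PySem.List.enumerate_cons, List.foldl_cons, List.foldl_cons]
      have htake : cs.take (((l.length : Int)) + 1 - 0).toNat = l ++ [c] := by
        have h1 : (((l.length : Int)) + 1 - 0).toNat = l.length + 1 := by omega
        rw [h1, h]
        rw [show l.length + 1 = l.length + 1 from rfl, List.take_append]
        simp
      have hcnt : ∀ ch, pvCountLe (pvParPositions cs ch) (l.length : Int)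
          = (((l ++ [c]).count ch : Int)) := by
        intro ch
        unfold pvParPositions
        rw [pvCountLe_enum ch cs 0 (l.length : Int), htake]
      by_cases hc : c = ','
      · subst hc
        have hl : (l ++ [',']).count '(' = l.count '(' := by
          simp [List.count_append]
        have hr : (l ++ [',']).count ')' = l.count ')' := by
          simp [List.count_append]
        by_cases hd : ((l.count '(' : Int)) = ((l.count ')' : Int))
        · have hd0 : ((l.count '(' : Int)) - ((l.count ')' : Int)) = 0 := by omega
          have hA : pvStepA (pvParPositions cs '(') (pvParPositions cs ')')
              (acc, (acc.length : Int)) ((l.length : Int), ',')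
              = (acc ++ [(l.length : Int)], (acc.length : Int) + 1) := by
            simp [pvStepA, hcnt, hl, hr, hd]
          have hB : pvStepB (acc, ((l.count '(' : Int)) - ((l.count ')' : Int)))
              ((l.length : Int), ',') = (acc ++ [(l.length : Int)], ((l.count '(' : Int)) - ((l.count ')' : Int))) := by
            simp [pvStepB, hd0]
          rw [hA, hB, hstart]
          have hlen2 : (acc.length : Int) + 1 = (((acc ++ [(l.length : Int)]).length : Int)) := by simp
          rw [hlen2]
          have := ih (l ++ [',']) (acc ++ [(l.length : Int)]) hcs
          rw [hl, hr] at this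
          exact this
        · have hd0 : ¬ (((l.count '(' : Int)) - ((l.count ')' : Int)) = 0) := by omega
          have hA : pvStepA (pvParPositions cs '(') (pvParPositions cs ')')
              (acc, (acc.length : Int)) ((l.length : Int), ',')
              = (acc, (acc.length : Int)) := by
            simp [pvStepA, hcnt, hl, hr, hd]
          have hB : pvStepB (acc, ((l.count '(' : Int)) - ((l.count ')' : Int)))
              ((l.length : Int), ',') = (acc, ((l.count '(' : Int)) - ((l.count ')' : Int))) := by
            simp [pvStepB, hd0]
          rw [hA, hB, hstart]
          have := ih (l ++ [',']) acc hcs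
          rw [hl, hr] at this
          exact this
      · by_cases hco : c = '('
        · subst hco
          have hA : pvStepA (pvParPositions cs '(') (pvParPositions cs ')')
              (acc, (acc.length : Int)) ((l.length : Int), '(')
              = (acc, (acc.length : Int)) := by
            simp [pvStepA]
          have hB : pvStepB (acc, ((l.count '(' : Int)) - ((l.count ')' : Int)))
              ((l.length : Int), '(') = (acc, ((l.count '(' : Int)) - ((l.count ')' : Int)) + 1) := by
            simp [pvStepB]
          have hdep : ((l.count '(' : Int)) - ((l.count ')' : Int)) + 1
              = (((l ++ ['(']).count '(' : Int)) - (((l ++ ['(']).count ')' : Int)) := by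
            simp [List.count_append]
            ring
          rw [hA, hB, hstart, hdep]
          exact ih (l ++ ['(']) acc hcs
        · by_cases hcc : c = ')'
          · subst hcc
            have hA : pvStepA (pvParPositions cs '(') (pvParPositions cs ')')
                (acc, (acc.length : Int)) ((l.length : Int), ')')
                = (acc, (acc.length : Int)) := by
              simp [pvStepA]
            have hB : pvStepB (acc, ((l.count '(' : Int)) - ((l.count ')' : Int)))
                ((l.length : Int), ')') = (acc, ((l.count '(' : Int)) - ((l.count ')' : Int)) - 1) := by
              simp [pvStepB]
            have hdep : ((l.count '(' : Int)) - ((l.count ')' : Int)) - 1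
                = (((l ++ [')']).count '(' : Int)) - (((l ++ [')']).count ')' : Int)) := by
              simp [List.count_append]
              ring
            rw [hA, hB, hstart, hdep]
            exact ih (l ++ [')']) acc hcs
          · have hA : pvStepA (pvParPositions cs '(') (pvParPositions cs ')')
                (acc, (acc.length : Int)) ((l.length : Int), c)
                = (acc, (acc.length : Int)) := by
              simp [pvStepA, hc]
            have hB : pvStepB (acc, ((l.count '(' : Int)) - ((l.count ')' : Int)))
                ((l.length : Int), c) = (acc, ((l.count '(' : Int)) - ((l.count ')' : Int))) := by
              simp [pvStepB, hc, hco, hcc]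
            have hdep : ((l.count '(' : Int)) - ((l.count ')' : Int))
                = (((l ++ [c]).count '(' : Int)) - (((l ++ [c]).count ')' : Int)) := by
              have h1 : [c].count '(' = 0 := by
                simp [hco]
              have h2 : [c].count ')' = 0 := by
                simp [hcc]
              simp [List.count_append, h1, h2]
            rw [hA, hB, hstart, hdep]
            exact ih (l ++ [c]) acc hcs

-- ===== VERDICT (by name: the statement is the Claim_ definition above) =====
theorem find_comma_spec : Claim_equal_find_comma := by
  intro input_str _
  unfold Spec_find_comma find_comma find_comma_alt
  have := pv_main input_str.toList input_str.toList [] [] (by simp)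
  simpa [PySem.List.enumerate] using this
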